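-- pv_equiv track=rewrite | github.com/sockduct/Weekly | codewars-wk6-2.py | game1
-- ===== SOURCE A (Python) =====
-- from math import gcd
--
-- def lcm(a, b):
--     return (a * b)//gcd(a, b)
--
-- def add_fractions(num1, denom1, num2, denom2):
--     lmult = lcm(denom1, denom2)
--
--     new_denom = lmult
--     new_num = num1 * (lmult//denom1)
--     new_num += (num2 * (lmult//denom2))
--
--     return new_num, new_denom
--
-- def game1(n):
--     numerator = 0
--     denominator = 1
--
--     for row_denom in range(1, n + 1):
--         for col_num in range(1, n + 1):
--             numerator, denominator = add_fractions(numerator, denominator,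
--                                                    col_num, row_denom + col_num)
--
--     divisor = gcd(numerator, denominator)
--     if divisor > 1:
--         numerator //= divisor
--         denominator //= divisor
--
--     if numerator == 0 or denominator == 1:
--         return [numerator]
--     else:
--         return [numerator, denominator]
-- ===== SOURCE B (Python) =====
-- def game1(n):
--     # Each term j/(i+j) pairs symmetrically with i/(i+j): the two sums are
--     # equal and add to n*n, so the total is exactly half of n*n.
--     if n <= 0:
--         return [0]
--     sq = n * n
--     if sq % 2 == 0:
--         return [sq // 2]
--     return [sq, 2]
-- ===== Notes on version B (the rewrite author's own statement) =====
-- stated objective: faster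
-- what changed: B replaces A's quadratic double loop of exact fraction additions by a closed form: by the row/column symmetry the double sum equals half of n squared, so B returns that value in lowest terms directly.
import Mathlib
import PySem

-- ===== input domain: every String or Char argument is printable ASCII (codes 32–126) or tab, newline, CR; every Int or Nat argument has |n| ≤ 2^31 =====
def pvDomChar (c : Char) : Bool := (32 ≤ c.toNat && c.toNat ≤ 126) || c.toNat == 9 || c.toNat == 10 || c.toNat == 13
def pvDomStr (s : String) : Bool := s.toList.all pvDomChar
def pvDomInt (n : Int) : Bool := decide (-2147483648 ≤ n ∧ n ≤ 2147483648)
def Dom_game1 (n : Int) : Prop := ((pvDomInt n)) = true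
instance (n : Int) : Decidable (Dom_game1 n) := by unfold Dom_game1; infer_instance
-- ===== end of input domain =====

-- B computes the same reduced fraction by a closed form (half of n squared, by the row/column
-- symmetry of the double sum) instead of A's doubly nested loop of fraction additions; objective: faster.

-- ===== PORT A =====
-- math.gcd(a, b): nonnegative gcd of the absolute values — exactly Int.gcd (hand port, exact on all Int)
def pyGcd (a b : Int) : Int := (Int.gcd a b : Int)

def pyLcm (a b : Int) : Int := PySem.Int.floordiv (a * b) (pyGcd a b)

def addFractions (num1 denom1 num2 denom2 : Int) : Int × Int :=
  let lmult := pyLcm denom1 denom2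
  let new_denom := lmult
  let new_num := num1 * (PySem.Int.floordiv lmult denom1)
                 + num2 * (PySem.Int.floordiv lmult denom2)
  (new_num, new_denom)

-- the double 'for' loop of A, accumulating (numerator, denominator) from (0, 1)
def game1Loop (n : Int) : Int × Int :=
  (PySem.List.pyRange 1 (n + 1) 1).foldl
    (fun st row_denom =>
      (PySem.List.pyRange 1 (n + 1) 1).foldl
        (fun st col_num => addFractions st.1 st.2 col_num (row_denom + col_num)) st)
    (0, 1)

-- A's final 'divisor = gcd(...); if divisor > 1: …' reduction step
def game1Reduce (st : Int × Int) : Int × Int :=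
  let divisor := pyGcd st.1 st.2
  if divisor > 1 then (PySem.Int.floordiv st.1 divisor, PySem.Int.floordiv st.2 divisor) else st

def game1 (n : Int) : List Int :=
  let st := game1Reduce (game1Loop n)
  if st.1 = 0 ∨ st.2 = 1 then [st.1] else [st.1, st.2]

-- ===== PORT B =====
def game1_alt (n : Int) : List Int :=
  if n ≤ 0 then [0]
  else
    let sq := n * n
    if PySem.Int.mod sq 2 = 0 then [PySem.Int.floordiv sq 2] else [sq, 2]

-- ===== PRECONDITION & SPEC =====
def Spec_game1 (n : Int) (out : List Int) : Prop := out = game1_alt n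
instance (n : Int) (out : List Int) : Decidable (Spec_game1 n out) := by unfold Spec_game1; infer_instance

-- ===== CLAIM (what is proved, stated in full; the proofs are below) =====
def Claim_equal_game1 : Prop := ∀ (n : Int), Dom_game1 n → Spec_game1 n (game1 n)

-- ===== LEMMAS AND PROOFS =====

-- add_fractions is exact fraction addition on positive denominators
lemma addFractions_spec (a d1 b d2 : Int) (h1 : 0 < d1) (h2 : 0 < d2) :
    0 < (addFractions a d1 b d2).2 ∧
    ((addFractions a d1 b d2).1 : ℚ) / ((addFractions a d1 b d2).2 : ℚ)
      = (a : ℚ) / (d1 : ℚ) + (b : ℚ) / (d2 : ℚ) := by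
  have hg : (0:Int) < (Int.gcd d1 d2 : Int) := by
    have := Int.gcd_pos_of_ne_zero_left d2 (show d1 ≠ 0 by omega)
    exact_mod_cast this
  have hgd1 : ((Int.gcd d1 d2 : Int)) ∣ d1 := Int.gcd_dvd_left d1 d2
  have hgd2 : ((Int.gcd d1 d2 : Int)) ∣ d2 := Int.gcd_dvd_right d1 d2
  have hlm : pyLcm d1 d2 = d1 * d2 / (Int.gcd d1 d2 : Int) := by
    simp [pyLcm, pyGcd, PySem.Int.floordiv_eq_ediv_of_pos hg]
  have hass1 : d1 * d2 / (Int.gcd d1 d2 : Int) = d1 * (d2 / (Int.gcd d1 d2 : Int)) :=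
    Int.mul_ediv_assoc d1 hgd2
  have hass2 : d1 * d2 / (Int.gcd d1 d2 : Int) = d2 * (d1 / (Int.gcd d1 d2 : Int)) := by
    rw [mul_comm d1 d2]; exact Int.mul_ediv_assoc d2 hgd1
  have hq2 : 0 < d2 / (Int.gcd d1 d2 : Int) := Int.ediv_pos_of_pos_of_dvd h2 (le_of_lt hg) hgd2
  have hlpos : 0 < pyLcm d1 d2 := by rw [hlm, hass1]; positivity
  have hd1l : d1 ∣ pyLcm d1 d2 := by rw [hlm, hass1]; exact Dvd.intro _ rfl
  have hd2l : d2 ∣ pyLcm d1 d2 := by rw [hlm, hass2]; exact Dvd.intro _ rfl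
  have e1 : ((PySem.Int.floordiv (pyLcm d1 d2) d1 : Int) : ℚ) * (d1 : ℚ) = ((pyLcm d1 d2 : Int) : ℚ) := by
    rw [PySem.Int.floordiv_eq_ediv_of_pos h1]
    exact_mod_cast Int.ediv_mul_cancel hd1l
  have e2 : ((PySem.Int.floordiv (pyLcm d1 d2) d2 : Int) : ℚ) * (d2 : ℚ) = ((pyLcm d1 d2 : Int) : ℚ) := by
    rw [PySem.Int.floordiv_eq_ediv_of_pos h2]
    exact_mod_cast Int.ediv_mul_cancel hd2l
  constructor
  · simpa [addFractions] using hlpos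
  · have hl0 : ((pyLcm d1 d2 : Int) : ℚ) ≠ 0 := by exact_mod_cast hlpos.ne'
    have hd10 : (d1 : ℚ) ≠ 0 := by exact_mod_cast h1.ne'
    have hd20 : (d2 : ℚ) ≠ 0 := by exact_mod_cast h2.ne'
    simp only [addFractions]
    push_cast
    field_simp
    linear_combination (a:ℚ) * d2 * e1 + (b:ℚ) * d1 * e2

-- the inner 'for col_num' loop accumulates the rational sum
lemma foldl_inner_spec (L : List Int) (row : Int) (hpos : ∀ c ∈ L, 0 < row + c)
    (st : Int × Int) (h : 0 < st.2) :
    0 < ((L.foldl (fun st c => addFractions st.1 st.2 c (row + c)) st).2) ∧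
    (((L.foldl (fun st c => addFractions st.1 st.2 c (row + c)) st).1 : ℚ)
      / ((L.foldl (fun st c => addFractions st.1 st.2 c (row + c)) st).2 : ℚ)
      = (st.1 : ℚ) / (st.2 : ℚ) + (L.map (fun c : Int => (c : ℚ) / ((row : ℚ) + (c : ℚ)))).sum) := by
  induction L generalizing st with
  | nil => exact ⟨h, by simp⟩
  | cons c L ih =>
    have hc : 0 < row + c := hpos c (by simp)
    obtain ⟨hp, hr⟩ := addFractions_spec st.1 st.2 c (row + c) h hc
    obtain ⟨hp', hr'⟩ := ih (fun x hx => hpos x (by simp [hx])) _ hp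
    refine ⟨hp', ?_⟩
    simp only [List.foldl_cons, List.map_cons, List.sum_cons] at *
    rw [hr', hr]
    push_cast
    ring

-- the outer 'for row_denom' loop
lemma foldl_outer_spec (R C : List Int) (hR : ∀ r ∈ R, ∀ c ∈ C, 0 < r + c)
    (st : Int × Int) (h : 0 < st.2) :
    0 < ((R.foldl (fun st r => C.foldl (fun st c => addFractions st.1 st.2 c (r + c)) st) st).2) ∧
    (((R.foldl (fun st r => C.foldl (fun st c => addFractions st.1 st.2 c (r + c)) st) st).1 : ℚ)
      / ((R.foldl (fun st r => C.foldl (fun st c => addFractions st.1 st.2 c (r + c)) st) st).2 : ℚ)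
      = (st.1 : ℚ) / (st.2 : ℚ)
        + (R.map (fun r : Int => (C.map (fun c : Int => (c : ℚ) / ((r : ℚ) + (c : ℚ)))).sum)).sum) := by
  induction R generalizing st with
  | nil => exact ⟨h, by simp⟩
  | cons r R ih =>
    obtain ⟨hp, hr⟩ := foldl_inner_spec C r (hR r (by simp)) st h
    obtain ⟨hp', hr'⟩ := ih (fun x hx => hR x (by simp [hx])) _ hp
    refine ⟨hp', ?_⟩
    simp only [List.foldl_cons, List.map_cons, List.sum_cons] at *
    rw [hr', hr]
    ring

-- bridge: a sum over List.range as a Finset.range sum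
lemma list_range_sum (m : Nat) (f : Nat → ℚ) :
    ((List.range m).map f).sum = ∑ i ∈ Finset.range m, f i := by
  simp [Finset.range]
  rfl

-- the symmetry identity: the double sum of (1+j)/((1+i)+(1+j)) over i,j < m is m^2/2
lemma double_sum_eq (m : Nat) :
    ∑ i ∈ Finset.range m, ∑ j ∈ Finset.range m,
      (1 + (j : ℚ)) / ((1 + (i : ℚ)) + (1 + (j : ℚ))) = (m : ℚ) * m / 2 := by
  have hD : ∀ i j : Nat, ((1 + (i:ℚ)) + (1 + (j:ℚ))) ≠ 0 := by
    intro i j; positivity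
  set S := ∑ i ∈ Finset.range m, ∑ j ∈ Finset.range m,
      (1 + (j : ℚ)) / ((1 + (i : ℚ)) + (1 + (j : ℚ))) with hS
  have hsym : S = ∑ i ∈ Finset.range m, ∑ j ∈ Finset.range m,
      (1 + (i : ℚ)) / ((1 + (i : ℚ)) + (1 + (j : ℚ))) := by
    rw [hS, Finset.sum_comm]
    apply Finset.sum_congr rfl; intro i _
    apply Finset.sum_congr rfl; intro j _
    rw [add_comm (1 + (i:ℚ)) (1 + (j:ℚ))]
  have htwo : S + S = (m : ℚ) * m := by
    nth_rewrite 2 [hsym]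
    rw [← Finset.sum_add_distrib]
    have : ∀ i ∈ Finset.range m, (∑ j ∈ Finset.range m,
        (1 + (j : ℚ)) / ((1 + (i : ℚ)) + (1 + (j : ℚ))) + ∑ j ∈ Finset.range m,
        (1 + (i : ℚ)) / ((1 + (i : ℚ)) + (1 + (j : ℚ)))) = (m : ℚ) := by
      intro i _
      rw [← Finset.sum_add_distrib]
      have : ∀ j ∈ Finset.range m, ((1 + (j : ℚ)) / ((1 + (i : ℚ)) + (1 + (j : ℚ)))
          + (1 + (i : ℚ)) / ((1 + (i : ℚ)) + (1 + (j : ℚ)))) = 1 := by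
        intro j _
        field_simp
        ring
      rw [Finset.sum_congr rfl this]
      simp
    rw [Finset.sum_congr rfl this]
    simp
  linarith

-- a fraction with positive denominator in lowest terms is Rat's canonical pair
lemma reduced_pair (a b : Int) (hb : 0 < b) (hcop : Int.gcd a b = 1) (q : ℚ)
    (hq : (a : ℚ) / (b : ℚ) = q) : a = q.num ∧ b = (q.den : Int) := by
  have hcop' : Nat.Coprime a.natAbs b.natAbs := hcop
  constructor
  · rw [← hq]; exact (Rat.num_div_eq_of_coprime hb hcop').symm
  · rw [← hq]; exact (Rat.den_div_eq_of_coprime hb hcop').symm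

-- A's final reduction yields the canonical reduced pair of the rational value
lemma reduce_spec (num den : Int) (hden : 0 < den) (q : ℚ) (hq : (num : ℚ) / (den : ℚ) = q) :
    game1Reduce (num, den) = (q.num, (q.den : Int)) := by
  have hg : (0:Int) < pyGcd num den := by
    have h := Int.gcd_pos_of_ne_zero_right num (show den ≠ 0 by omega)
    simp only [pyGcd]
    exact_mod_cast h
  have hdl : pyGcd num den ∣ num := Int.gcd_dvd_left num den
  have hdr : pyGcd num den ∣ den := Int.gcd_dvd_right num den
  unfold game1Reduce
  by_cases hcase : pyGcd num den > 1
  · simp only [hcase, if_pos]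
    have hnum' : PySem.Int.floordiv num (pyGcd num den) = num / pyGcd num den :=
      PySem.Int.floordiv_eq_ediv_of_pos hg
    have hden' : PySem.Int.floordiv den (pyGcd num den) = den / pyGcd num den :=
      PySem.Int.floordiv_eq_ediv_of_pos hg
    rw [hnum', hden']
    have hdpos : 0 < den / pyGcd num den := Int.ediv_pos_of_pos_of_dvd hden (le_of_lt hg) hdr
    have hcop : Int.gcd (num / pyGcd num den) (den / pyGcd num den) = 1 := by
      apply Int.gcd_div_gcd_div_gcd
      have := hg; simp only [pyGcd] at this; exact_mod_cast this
    have hval : ((num / pyGcd num den : Int) : ℚ) / ((den / pyGcd num den : Int) : ℚ) = q := by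
      rw [← hq]
      have e1 : ((num / pyGcd num den : Int) : ℚ) * ((pyGcd num den : Int) : ℚ) = (num : ℚ) := by
        exact_mod_cast Int.ediv_mul_cancel hdl
      have e2 : ((den / pyGcd num den : Int) : ℚ) * ((pyGcd num den : Int) : ℚ) = (den : ℚ) := by
        exact_mod_cast Int.ediv_mul_cancel hdr
      have hg0 : ((pyGcd num den : Int) : ℚ) ≠ 0 := by exact_mod_cast hg.ne'
      have hd0 : (den : ℚ) ≠ 0 := by exact_mod_cast hden.ne'
      have hd0' : ((den / pyGcd num den : Int) : ℚ) ≠ 0 := by exact_mod_cast hdpos.ne'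
      field_simp
      linear_combination ((den / pyGcd num den : Int) : ℚ) * e1 - ((num / pyGcd num den : Int) : ℚ) * e2
    obtain ⟨h1, h2⟩ := reduced_pair _ _ hdpos hcop q hval
    simp [h1, h2]
  · simp only [hcase, if_false]
    have hone : Int.gcd num den = 1 := by
      have hle : pyGcd num den ≤ 1 := not_lt.mp hcase
      have h1 : (1:Int) ≤ pyGcd num den := hg
      have h2 : pyGcd num den = 1 := le_antisymm hle h1
      simpa [pyGcd] using h2
    obtain ⟨h1, h2⟩ := reduced_pair num den hden hone q hq
    simp [h1, h2]

-- the list-level double sum over [1..m] is m^2/2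
lemma list_double_sum (m : Nat) :
    ((((List.range m).map (fun k : Nat => 1 + (k : Int)))).map
      (fun r : Int => ((((List.range m).map (fun k : Nat => 1 + (k : Int)))).map
        (fun c : Int => (c : ℚ) / ((r : ℚ) + (c : ℚ)))).sum)).sum = (m : ℚ) * m / 2 := by
  rw [List.map_map, list_range_sum]
  have hinner : ∀ i ∈ Finset.range m,
      ((fun r : Int => ((((List.range m).map (fun k : Nat => 1 + (k : Int)))).map
          (fun c : Int => (c : ℚ) / ((r : ℚ) + (c : ℚ)))).sum) ∘ (fun k : Nat => 1 + (k : Int))) i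
        = ∑ j ∈ Finset.range m, (1 + (j : ℚ)) / ((1 + (i : ℚ)) + (1 + (j : ℚ))) := by
    intro i _
    simp only [Function.comp_apply]
    rw [List.map_map, list_range_sum]
    apply Finset.sum_congr rfl
    intro j _
    simp only [Function.comp_apply]
    push_cast
    ring
  rw [Finset.sum_congr rfl hinner, double_sum_eq]

-- the loop computes a fraction whose value is n^2/2 (for n ≥ 1)
lemma game1Loop_spec (n : Int) (hn : 0 < n) :
    0 < (game1Loop n).2 ∧
    ((game1Loop n).1 : ℚ) / ((game1Loop n).2 : ℚ) = (n : ℚ) * n / 2 := by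
  have hRpos : ∀ r ∈ PySem.List.pyRange 1 (n + 1) 1, ∀ c ∈ PySem.List.pyRange 1 (n + 1) 1,
      0 < r + c := by
    intro r hr c hc
    rw [PySem.List.mem_pyRange_one] at hr hc
    omega
  obtain ⟨hp, hr⟩ := foldl_outer_spec (PySem.List.pyRange 1 (n + 1) 1)
    (PySem.List.pyRange 1 (n + 1) 1) hRpos (0, 1) (by norm_num)
  refine ⟨hp, ?_⟩
  rw [show game1Loop n = (PySem.List.pyRange 1 (n + 1) 1).foldl
    (fun st r => (PySem.List.pyRange 1 (n + 1) 1).foldl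
      (fun st c => addFractions st.1 st.2 c (r + c)) st) (0, 1) from rfl]
  rw [hr]
  have hrange : PySem.List.pyRange 1 (n + 1) 1
      = (List.range n.toNat).map (fun k : Nat => 1 + (k : Int)) := by
    have he : (n + 1 - 1).toNat = n.toNat := by omega
    rw [PySem.List.pyRange_one, he]
  rw [hrange, list_double_sum]
  have hcast : ((n.toNat : ℚ)) = (n : ℚ) := by
    have h := Int.toNat_of_nonneg (le_of_lt hn)
    exact_mod_cast congrArg (fun z : Int => (z : ℚ)) h
  rw [hcast]
  ring

-- ===== VERDICT (by name: the statement is the Claim_ definition above) =====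
theorem game1_spec : Claim_equal_game1 := by
  intro n _
  unfold Spec_game1
  by_cases hn : n ≤ 0
  · have hempty : PySem.List.pyRange 1 (n + 1) 1 = [] :=
      PySem.List.pyRange_one_eq_nil (by omega)
    have hloop : game1Loop n = (0, 1) := by
      unfold game1Loop; rw [hempty]; rfl
    rw [show game1 n = (let st := game1Reduce (game1Loop n);
        if st.1 = 0 ∨ st.2 = 1 then [st.1] else [st.1, st.2]) from rfl, hloop]
    have hB : game1_alt n = [0] := by unfold game1_alt; rw [if_pos hn]
    rw [hB]
    norm_num [game1Reduce, pyGcd]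
  · push Not at hn
    obtain ⟨hp, hr⟩ := game1Loop_spec n hn
    have hred : game1Reduce (game1Loop n)
        = (((n : ℚ) * n / 2).num, (((n : ℚ) * n / 2).den : Int)) := by
      have := reduce_spec (game1Loop n).1 (game1Loop n).2 hp ((n : ℚ) * n / 2) hr
      simpa using this
    rw [show game1 n = (let st := game1Reduce (game1Loop n);
        if st.1 = 0 ∨ st.2 = 1 then [st.1] else [st.1, st.2]) from rfl, hred]
    by_cases heven : (2:Int) ∣ n
    · obtain ⟨k, hk⟩ := heven
      have hq : ((n : ℚ) * n / 2) = ((2 * k * k : Int) : ℚ) := by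
        subst hk; push_cast; ring
      rw [hq]
      simp only [Rat.num_intCast, Rat.den_intCast]
      have hB : game1_alt n = [2 * k * k] := by
        unfold game1_alt
        rw [if_neg (by omega)]
        have hdvd : (2:Int) ∣ n * n := ⟨k * n, by subst hk; ring⟩
        rw [if_pos ((PySem.Int.mod_eq_zero_iff_dvd (n * n) 2).mpr hdvd)]
        rw [PySem.Int.floordiv_eq_ediv_of_pos (by norm_num)]
        congr 1
        subst hk
        rw [show (2*k) * (2*k) = (2*k*k) * 2 by ring]
        exact Int.mul_ediv_cancel _ (by norm_num)
      rw [hB]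
      norm_num
    · have hodd : Odd n := Int.not_even_iff_odd.mp (fun he => heven (even_iff_two_dvd.mp he))
      have hnodvd : ¬ (2:Int) ∣ n * n := by
        intro h
        exact heven ((Int.prime_two.dvd_mul.mp h).elim id id)
      have hq : ((n : ℚ) * n / 2) = ((n * n : Int) : ℚ) / (((2:Int)) : ℚ) := by
        push_cast; ring
      have hcop : Int.gcd (n * n) 2 = 1 := by
        have hnodvd' : ¬ (2:Nat) ∣ (n * n).natAbs := by
          intro hd
          exact hnodvd (by simpa using Int.natAbs_dvd_natAbs.mp (by simpa using hd))
        have h2 : Nat.Coprime 2 (n * n).natAbs :=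
          (Nat.Prime.coprime_iff_not_dvd Nat.prime_two).mpr hnodvd'
        simpa [Int.gcd, Nat.coprime_comm] using h2.symm
      obtain ⟨h1, h2⟩ := reduced_pair (n * n) 2 (by norm_num) hcop ((n : ℚ) * n / 2) hq.symm
      rw [← h1, ← h2]
      have hne : n * n ≠ 0 := by positivity
      rw [if_neg (by push Not; exact ⟨hne, by norm_num⟩)]
      unfold game1_alt
      rw [if_neg (by omega)]
      rw [if_neg (by simpa [PySem.Int.mod_eq_zero_iff_dvd] using hnodvd)]
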